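-- pv_equiv track=rewrite | github.com/hazlema/AI-Chess | chess_arena.py | render_captured
-- ===== SOURCE A (Python) =====
-- CAPTURED_SYMBOLS = {
--     "Q": "♛", "R": "♜", "B": "♝", "N": "♞", "P": "♟",
--     "q": "♕", "r": "♖", "b": "♗", "n": "♘", "p": "♙",
-- }
--
-- PIECE_ORDER = {"Q": 0, "R": 1, "B": 2, "N": 3, "P": 4}
--
-- class C:
--     RESET    = "\033[0m"
--     BOLD     = "\033[1m"
--     DIM      = "\033[2m"
--     ITALIC   = "\033[3m"
--     WHITE_SQ = "\033[48;5;180m"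
--     BLACK_SQ = "\033[48;5;94m"
--     WHITE_PC = "\033[38;5;255m\033[1m"
--     BLACK_PC = "\033[38;5;16m\033[1m"
--     HEADER   = "\033[38;5;75m"
--     MOVE_W   = "\033[38;5;255m"
--     MOVE_B   = "\033[38;5;249m"
--     ERROR    = "\033[38;5;203m"
--     SUCCESS  = "\033[38;5;114m"
--     INFO     = "\033[38;5;244m"
--     LABEL    = "\033[38;5;137m"
--     COMMENT  = "\033[38;5;103m"
--     HIGHLIGHT = "\033[48;5;107m"
--
-- def render_captured(captured_white: list, captured_black: list) -> str:
--     """Render captured pieces for both sides."""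
--     def sort_pieces(pieces):
--         return sorted(pieces, key=lambda p: PIECE_ORDER.get(p.upper(), 99))
--
--     w_pieces = sort_pieces(captured_white)
--     b_pieces = sort_pieces(captured_black)
--
--     # "Captured by White" = black pieces that white took
--     w_took = " ".join(CAPTURED_SYMBOLS.get(p.lower(), p) for p in b_pieces) if b_pieces else "—"
--     # "Captured by Black" = white pieces that black took
--     b_took = " ".join(CAPTURED_SYMBOLS.get(p, p) for p in w_pieces) if w_pieces else "—"
--
--     lines = []
--     lines.append(f"  {C.DIM}White took:{C.RESET} {w_took}")
--     lines.append(f"  {C.DIM}Black took:{C.RESET} {b_took}")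
--     return "\n".join(lines)
-- ===== SOURCE B (Python) =====
-- # Bucket arrangement instead of sorted(): one filter pass per ordered category,
-- # preserving original order within each and putting unknown pieces last.
-- CAPTURED_SYMBOLS = {
--     "Q": "\u265b", "R": "\u265c", "B": "\u265d", "N": "\u265e", "P": "\u265f",
--     "q": "\u2655", "r": "\u2656", "b": "\u2657", "n": "\u2658", "p": "\u2659",
-- }
--
-- PIECE_ORDER = {"Q": 0, "R": 1, "B": 2, "N": 3, "P": 4}
--
-- DIM = "\033[2m"
-- RESET = "\033[0m"
--
--
-- def render_captured(captured_white: list, captured_black: list) -> str: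
--     """Render captured pieces for both sides."""
--     def arrange(pieces):
--         known = [p for k in ("Q", "R", "B", "N", "P")
--                    for p in pieces if p.upper() == k]
--         unknown = [p for p in pieces if p.upper() not in PIECE_ORDER]
--         return known + unknown
--
--     def row(pieces, symbol):
--         return " ".join(symbol(p) for p in pieces) if pieces else "\u2014"
--
--     w_took = row(arrange(captured_black), lambda p: CAPTURED_SYMBOLS.get(p.lower(), p))
--     b_took = row(arrange(captured_white), lambda p: CAPTURED_SYMBOLS.get(p, p))
--     return (f"  {DIM}White took:{RESET} {w_took}\n"
--             f"  {DIM}Black took:{RESET} {b_took}")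
-- ===== Notes on version B (the rewrite author's own statement) =====
-- stated objective: alternative
-- what changed: Replaces the keyed stable sort with an explicit bucket arrangement: one filter pass per ordered piece category (Q,R,B,N,P), then the unknown pieces, concatenated; the lines are assembled directly instead of via a list joined with newline.
import Mathlib
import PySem

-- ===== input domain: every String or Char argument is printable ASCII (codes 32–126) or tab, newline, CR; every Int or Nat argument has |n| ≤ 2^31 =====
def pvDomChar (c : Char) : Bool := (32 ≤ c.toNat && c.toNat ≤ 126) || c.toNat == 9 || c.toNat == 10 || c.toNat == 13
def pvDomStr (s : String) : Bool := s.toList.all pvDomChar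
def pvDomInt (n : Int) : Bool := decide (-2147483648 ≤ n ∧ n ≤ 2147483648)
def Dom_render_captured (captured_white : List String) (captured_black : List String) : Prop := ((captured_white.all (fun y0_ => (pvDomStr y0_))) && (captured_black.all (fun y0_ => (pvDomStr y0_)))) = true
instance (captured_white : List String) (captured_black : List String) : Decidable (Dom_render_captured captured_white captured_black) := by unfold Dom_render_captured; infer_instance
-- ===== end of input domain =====

-- B replaces A's keyed stable sort with per-category filter passes (bucket arrangement); same output.

-- ===== PORT A =====
def pvCapturedSymbols : PySem.Dict String String :=
  PySem.Dict.ofList [("Q","♛"),("R","♜"),("B","♝"),("N","♞"),("P","♟"),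
                     ("q","♕"),("r","♖"),("b","♗"),("n","♘"),("p","♙")]

def pvPieceOrder : PySem.Dict String Int :=
  PySem.Dict.ofList [("Q",0),("R",1),("B",2),("N",3),("P",4)]

def pvSortPieces (pieces : List String) : List String :=
  PySem.List.sorted pieces (fun p => pvPieceOrder.getD (PySem.Str.upper p) 99) false

def render_captured (captured_white : List String) (captured_black : List String) : String :=
  let w_pieces := pvSortPieces captured_white
  let b_pieces := pvSortPieces captured_black
  let w_took := if b_pieces = [] then "—"
    else PySem.Str.join " " (b_pieces.map (fun p => pvCapturedSymbols.getD (PySem.Str.lower p) p))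
  let b_took := if w_pieces = [] then "—"
    else PySem.Str.join " " (w_pieces.map (fun p => pvCapturedSymbols.getD p p))
  let lines : List String := []
  let lines := lines ++ ["  \x1b[2mWhite took:\x1b[0m " ++ w_took]
  let lines := lines ++ ["  \x1b[2mBlack took:\x1b[0m " ++ b_took]
  PySem.Str.join "\n" lines

-- ===== PORT B =====
def pvArrange (pieces : List String) : List String :=
  ((["Q","R","B","N","P"] : List String).map
     (fun k => pieces.filter (fun p => PySem.Str.upper p == k))).flatten
  ++ pieces.filter (fun p => !(pvPieceOrder.contains (PySem.Str.upper p)))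

def pvRow (pieces : List String) (symbol : String → String) : String :=
  if pieces = [] then "—" else PySem.Str.join " " (pieces.map symbol)

def render_captured_alt (captured_white : List String) (captured_black : List String) : String :=
  let w_took := pvRow (pvArrange captured_black) (fun p => pvCapturedSymbols.getD (PySem.Str.lower p) p)
  let b_took := pvRow (pvArrange captured_white) (fun p => pvCapturedSymbols.getD p p)
  "  \x1b[2mWhite took:\x1b[0m " ++ w_took ++ "\n" ++ ("  \x1b[2mBlack took:\x1b[0m " ++ b_took)

-- ===== PRECONDITION & SPEC =====
def Spec_render_captured (captured_white : List String) (captured_black : List String) (out : String) : Prop := out = render_captured_alt captured_white captured_black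
instance (captured_white : List String) (captured_black : List String) (out : String) : Decidable (Spec_render_captured captured_white captured_black out) := by unfold Spec_render_captured; infer_instance

-- ===== CLAIM (what is proved, stated in full; the proofs are below) =====
def Claim_equal_render_captured : Prop := ∀ (captured_white : List String) (captured_black : List String), Dom_render_captured captured_white captured_black → Spec_render_captured captured_white captured_black (render_captured captured_white captured_black)

-- ===== LEMMAS AND PROOFS =====

-- the key A sorts by
def pvKey (p : String) : Int := pvPieceOrder.getD (PySem.Str.upper p) 99

theorem pvKey_cases (p : String) :
    pvKey p = (if PySem.Str.upper p = "Q" then 0 else if PySem.Str.upper p = "R" then 1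
      else if PySem.Str.upper p = "B" then 2 else if PySem.Str.upper p = "N" then 3
      else if PySem.Str.upper p = "P" then 4 else (99 : Int)) := by
  have h : pvPieceOrder = PySem.Dict.mk [("Q",0),("R",1),("B",2),("N",3),("P",4)] := by decide
  by_cases hQ : PySem.Str.upper p = "Q"
  · simp [pvKey, h, PySem.Dict.getD_eq_get?_getD, PySem.Dict.get?_mk_cons, hQ]
  by_cases hR : PySem.Str.upper p = "R"
  · simp [pvKey, h, PySem.Dict.getD_eq_get?_getD, PySem.Dict.get?_mk_cons, hR]
  by_cases hB : PySem.Str.upper p = "B"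
  · simp [pvKey, h, PySem.Dict.getD_eq_get?_getD, PySem.Dict.get?_mk_cons, hB]
  by_cases hN : PySem.Str.upper p = "N"
  · simp [pvKey, h, PySem.Dict.getD_eq_get?_getD, PySem.Dict.get?_mk_cons, hN]
  by_cases hP : PySem.Str.upper p = "P"
  · simp [pvKey, h, PySem.Dict.getD_eq_get?_getD, PySem.Dict.get?_mk_cons, hP]
  · simp [pvKey, h, PySem.Dict.getD_eq_get?_getD, PySem.Dict.get?,
      Ne.symm hQ, Ne.symm hR, Ne.symm hB, Ne.symm hN, Ne.symm hP, hQ, hR, hB, hN, hP]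

theorem pvContains_order (s : String) :
    pvPieceOrder.contains s = (s == "Q" || s == "R" || s == "B" || s == "N" || s == "P") := by
  have h : pvPieceOrder = PySem.Dict.mk [("Q",0),("R",1),("B",2),("N",3),("P",4)] := by decide
  simp [h, PySem.Dict.contains, List.any, BEq.comm, Bool.or_assoc]

theorem pvInsertBy_bucket {α : Type} (k : α → Int) (x : α) (l1 l2 : List α)
    (h1 : ∀ y ∈ l1, k y ≤ k x) (h2 : ∀ y ∈ l2, k x < k y) :
    PySem.List.insertBy (fun a b => decide (k a < k b)) x (l1 ++ l2) = l1 ++ x :: l2 := by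
  induction l1 with
  | nil =>
    cases l2 with
    | nil => simp [PySem.List.insertBy]
    | cons y ys =>
      have hb : decide (k x < k y) = true := by simp; exact h2 y (by simp)
      simp [PySem.List.insertBy, hb]
  | cons y t ih =>
    have hb : decide (k x < k y) = false := by simp; exact h1 y (by simp)
    simp only [List.cons_append, PySem.List.insertBy, hb]
    simp only [Bool.false_eq_true, if_false, List.cons.injEq, true_and]
    exact ih (fun z hz => h1 z (by simp [hz]))

theorem pvSorted_buckets {α : Type} (k : α → Int)
    (xs : List α) (hk : ∀ x ∈ xs, k x = 0 ∨ k x = 1 ∨ k x = 2 ∨ k x = 3 ∨ k x = 4 ∨ k x = 99) :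
    PySem.List.sorted xs k false =
      xs.filter (fun x => k x == 0) ++ xs.filter (fun x => k x == 1) ++
      xs.filter (fun x => k x == 2) ++ xs.filter (fun x => k x == 3) ++
      xs.filter (fun x => k x == 4) ++ xs.filter (fun x => k x == 99) := by
  have hmem : ∀ (v : Int) (ys : List α) (y : α), y ∈ List.filter (fun z => k z == v) ys → k y = v := by
    intro v ys y hy
    simpa using (List.mem_filter.mp hy).2
  induction xs using List.reverseRecOn with
  | nil => rfl
  | append_singleton xs x ih =>
    have hstep : PySem.List.sorted (xs ++ [x]) k false =
        PySem.List.insertBy (fun a b => decide (k a < k b)) x (PySem.List.sorted xs k false) := by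
      simp [PySem.List.sorted, List.foldl_append]
    have hsing : ∀ v : Int, List.filter (fun z => k z == v) [x] = if k x = v then [x] else [] := by
      intro v; simp [List.filter_singleton]
    rw [hstep, ih (fun y hy => hk y (by simp [hy]))]
    simp only [List.filter_append, hsing]
    rcases hk x (by simp) with h | h | h | h | h | h
    · -- k x = 0
      have h1 : ∀ y ∈ xs.filter (fun z => k z == (0 : Int)), k y ≤ k x := by
        intro y hy
        have := hmem _ _ _ hy; omega
      have h2 : ∀ y ∈ xs.filter (fun z => k z == (1 : Int)) ++ xs.filter (fun z => k z == (2 : Int)) ++ xs.filter (fun z => k z == (3 : Int)) ++ xs.filter (fun z => k z == (4 : Int)) ++ xs.filter (fun z => k z == (99 : Int)), k x < k y := by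
        intro y hy
        simp only [List.mem_append] at hy
        rcases hy with ((((hy|hy)|hy)|hy)|hy) <;> (have := hmem _ _ _ hy; omega)
      rw [show xs.filter (fun z => k z == (0 : Int)) ++ xs.filter (fun z => k z == (1 : Int)) ++ xs.filter (fun z => k z == (2 : Int)) ++ xs.filter (fun z => k z == (3 : Int)) ++ xs.filter (fun z => k z == (4 : Int)) ++ xs.filter (fun z => k z == (99 : Int)) = (xs.filter (fun z => k z == (0 : Int))) ++ (xs.filter (fun z => k z == (1 : Int)) ++ xs.filter (fun z => k z == (2 : Int)) ++ xs.filter (fun z => k z == (3 : Int)) ++ xs.filter (fun z => k z == (4 : Int)) ++ xs.filter (fun z => k z == (99 : Int))) from by simp [List.append_assoc]]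
      rw [pvInsertBy_bucket k x _ _ h1 h2]
      simp [h, List.append_assoc]
    · -- k x = 1
      have h1 : ∀ y ∈ xs.filter (fun z => k z == (0 : Int)) ++ xs.filter (fun z => k z == (1 : Int)), k y ≤ k x := by
        intro y hy
        simp only [List.mem_append] at hy
        rcases hy with (hy|hy) <;> (have := hmem _ _ _ hy; omega)
      have h2 : ∀ y ∈ xs.filter (fun z => k z == (2 : Int)) ++ xs.filter (fun z => k z == (3 : Int)) ++ xs.filter (fun z => k z == (4 : Int)) ++ xs.filter (fun z => k z == (99 : Int)), k x < k y := by
        intro y hy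
        simp only [List.mem_append] at hy
        rcases hy with (((hy|hy)|hy)|hy) <;> (have := hmem _ _ _ hy; omega)
      rw [show xs.filter (fun z => k z == (0 : Int)) ++ xs.filter (fun z => k z == (1 : Int)) ++ xs.filter (fun z => k z == (2 : Int)) ++ xs.filter (fun z => k z == (3 : Int)) ++ xs.filter (fun z => k z == (4 : Int)) ++ xs.filter (fun z => k z == (99 : Int)) = (xs.filter (fun z => k z == (0 : Int)) ++ xs.filter (fun z => k z == (1 : Int))) ++ (xs.filter (fun z => k z == (2 : Int)) ++ xs.filter (fun z => k z == (3 : Int)) ++ xs.filter (fun z => k z == (4 : Int)) ++ xs.filter (fun z => k z == (99 : Int))) from by simp [List.append_assoc]]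
      rw [pvInsertBy_bucket k x _ _ h1 h2]
      simp [h, List.append_assoc]
    · -- k x = 2
      have h1 : ∀ y ∈ xs.filter (fun z => k z == (0 : Int)) ++ xs.filter (fun z => k z == (1 : Int)) ++ xs.filter (fun z => k z == (2 : Int)), k y ≤ k x := by
        intro y hy
        simp only [List.mem_append] at hy
        rcases hy with ((hy|hy)|hy) <;> (have := hmem _ _ _ hy; omega)
      have h2 : ∀ y ∈ xs.filter (fun z => k z == (3 : Int)) ++ xs.filter (fun z => k z == (4 : Int)) ++ xs.filter (fun z => k z == (99 : Int)), k x < k y := by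
        intro y hy
        simp only [List.mem_append] at hy
        rcases hy with ((hy|hy)|hy) <;> (have := hmem _ _ _ hy; omega)
      rw [show xs.filter (fun z => k z == (0 : Int)) ++ xs.filter (fun z => k z == (1 : Int)) ++ xs.filter (fun z => k z == (2 : Int)) ++ xs.filter (fun z => k z == (3 : Int)) ++ xs.filter (fun z => k z == (4 : Int)) ++ xs.filter (fun z => k z == (99 : Int)) = (xs.filter (fun z => k z == (0 : Int)) ++ xs.filter (fun z => k z == (1 : Int)) ++ xs.filter (fun z => k z == (2 : Int))) ++ (xs.filter (fun z => k z == (3 : Int)) ++ xs.filter (fun z => k z == (4 : Int)) ++ xs.filter (fun z => k z == (99 : Int))) from by simp [List.append_assoc]]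
      rw [pvInsertBy_bucket k x _ _ h1 h2]
      simp [h, List.append_assoc]
    · -- k x = 3
      have h1 : ∀ y ∈ xs.filter (fun z => k z == (0 : Int)) ++ xs.filter (fun z => k z == (1 : Int)) ++ xs.filter (fun z => k z == (2 : Int)) ++ xs.filter (fun z => k z == (3 : Int)), k y ≤ k x := by
        intro y hy
        simp only [List.mem_append] at hy
        rcases hy with (((hy|hy)|hy)|hy) <;> (have := hmem _ _ _ hy; omega)
      have h2 : ∀ y ∈ xs.filter (fun z => k z == (4 : Int)) ++ xs.filter (fun z => k z == (99 : Int)), k x < k y := by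
        intro y hy
        simp only [List.mem_append] at hy
        rcases hy with (hy|hy) <;> (have := hmem _ _ _ hy; omega)
      rw [show xs.filter (fun z => k z == (0 : Int)) ++ xs.filter (fun z => k z == (1 : Int)) ++ xs.filter (fun z => k z == (2 : Int)) ++ xs.filter (fun z => k z == (3 : Int)) ++ xs.filter (fun z => k z == (4 : Int)) ++ xs.filter (fun z => k z == (99 : Int)) = (xs.filter (fun z => k z == (0 : Int)) ++ xs.filter (fun z => k z == (1 : Int)) ++ xs.filter (fun z => k z == (2 : Int)) ++ xs.filter (fun z => k z == (3 : Int))) ++ (xs.filter (fun z => k z == (4 : Int)) ++ xs.filter (fun z => k z == (99 : Int))) from by simp [List.append_assoc]]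
      rw [pvInsertBy_bucket k x _ _ h1 h2]
      simp [h, List.append_assoc]
    · -- k x = 4
      have h1 : ∀ y ∈ xs.filter (fun z => k z == (0 : Int)) ++ xs.filter (fun z => k z == (1 : Int)) ++ xs.filter (fun z => k z == (2 : Int)) ++ xs.filter (fun z => k z == (3 : Int)) ++ xs.filter (fun z => k z == (4 : Int)), k y ≤ k x := by
        intro y hy
        simp only [List.mem_append] at hy
        rcases hy with ((((hy|hy)|hy)|hy)|hy) <;> (have := hmem _ _ _ hy; omega)
      have h2 : ∀ y ∈ xs.filter (fun z => k z == (99 : Int)), k x < k y := by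
        intro y hy
        have := hmem _ _ _ hy; omega
      rw [show xs.filter (fun z => k z == (0 : Int)) ++ xs.filter (fun z => k z == (1 : Int)) ++ xs.filter (fun z => k z == (2 : Int)) ++ xs.filter (fun z => k z == (3 : Int)) ++ xs.filter (fun z => k z == (4 : Int)) ++ xs.filter (fun z => k z == (99 : Int)) = (xs.filter (fun z => k z == (0 : Int)) ++ xs.filter (fun z => k z == (1 : Int)) ++ xs.filter (fun z => k z == (2 : Int)) ++ xs.filter (fun z => k z == (3 : Int)) ++ xs.filter (fun z => k z == (4 : Int))) ++ (xs.filter (fun z => k z == (99 : Int))) from by simp [List.append_assoc]]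
      rw [pvInsertBy_bucket k x _ _ h1 h2]
      simp [h, List.append_assoc]
    · -- k x = 99
      have h1 : ∀ y ∈ xs.filter (fun z => k z == (0 : Int)) ++ xs.filter (fun z => k z == (1 : Int)) ++ xs.filter (fun z => k z == (2 : Int)) ++ xs.filter (fun z => k z == (3 : Int)) ++ xs.filter (fun z => k z == (4 : Int)) ++ xs.filter (fun z => k z == (99 : Int)), k y ≤ k x := by
        intro y hy
        simp only [List.mem_append] at hy
        rcases hy with (((((hy|hy)|hy)|hy)|hy)|hy) <;> (have := hmem _ _ _ hy; omega)
      have h2 : ∀ y ∈ ([] : List α), k x < k y := by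
        intro y hy
        simp at hy
      rw [show xs.filter (fun z => k z == (0 : Int)) ++ xs.filter (fun z => k z == (1 : Int)) ++ xs.filter (fun z => k z == (2 : Int)) ++ xs.filter (fun z => k z == (3 : Int)) ++ xs.filter (fun z => k z == (4 : Int)) ++ xs.filter (fun z => k z == (99 : Int)) = (xs.filter (fun z => k z == (0 : Int)) ++ xs.filter (fun z => k z == (1 : Int)) ++ xs.filter (fun z => k z == (2 : Int)) ++ xs.filter (fun z => k z == (3 : Int)) ++ xs.filter (fun z => k z == (4 : Int)) ++ xs.filter (fun z => k z == (99 : Int))) ++ (([] : List α)) from by simp [List.append_assoc]]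
      rw [pvInsertBy_bucket k x _ _ h1 h2]
      simp [h, List.append_assoc]

theorem pvJoin2 (a b : String) : PySem.Str.join "\n" [a, b] = a ++ "\n" ++ b := by
  simp [PySem.Str.join, PySem.Chars.join, List.intercalate]
  rw [show ('\n' :: b.toList) = "\n".toList ++ b.toList from rfl]
  rw [String.ofList_append, String.ofList_toList, String.ofList_toList]
  rw [String.append_assoc]

theorem pvFilter_key (pieces : List String) (v : Int) (s : String)
    (hv : ∀ p : String, (pvKey p = v) ↔ (PySem.Str.upper p = s)) :
    pieces.filter (fun p => PySem.Str.upper p == s) = pieces.filter (fun p => pvKey p == v) := by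
  apply List.filter_congr
  intro p _
  by_cases hp : PySem.Str.upper p = s
  · simp [hp, (hv p).mpr hp]
  · have : pvKey p ≠ v := fun hc => hp ((hv p).mp hc)
    simp [hp, this]

theorem pvFilter_unknown (pieces : List String) :
    pieces.filter (fun p => !(pvPieceOrder.contains (PySem.Str.upper p))) =
    pieces.filter (fun p => pvKey p == 99) := by
  apply List.filter_congr
  intro p _
  rw [pvContains_order, pvKey_cases]
  split_ifs <;> simp_all

theorem pvSort_eq_arrange (pieces : List String) :
    pvSortPieces pieces = pvArrange pieces := by
  have hsort : pvSortPieces pieces = PySem.List.sorted pieces pvKey false := rfl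
  have hk : ∀ x ∈ pieces, pvKey x = 0 ∨ pvKey x = 1 ∨ pvKey x = 2 ∨ pvKey x = 3 ∨ pvKey x = 4 ∨ pvKey x = 99 := by
    intro x _
    rw [pvKey_cases]
    split_ifs <;> norm_num
  have hv : ∀ (v : Int) (s : String), ((s = "Q" ∧ v = 0) ∨ (s = "R" ∧ v = 1) ∨ (s = "B" ∧ v = 2) ∨
      (s = "N" ∧ v = 3) ∨ (s = "P" ∧ v = 4)) → ∀ p : String, (pvKey p = v) ↔ (PySem.Str.upper p = s) := by
    intro v s hvs p
    rw [pvKey_cases]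
    rcases hvs with ⟨hs, hv⟩ | ⟨hs, hv⟩ | ⟨hs, hv⟩ | ⟨hs, hv⟩ | ⟨hs, hv⟩ <;> subst hs <;> subst hv <;>
      split_ifs <;> simp_all
  rw [hsort, pvSorted_buckets pvKey pieces hk]
  unfold pvArrange
  simp only [List.map_cons, List.map_nil, List.flatten_cons, List.flatten_nil, List.append_nil]
  rw [pvFilter_key pieces 0 "Q" (hv 0 "Q" (by simp)), pvFilter_key pieces 1 "R" (hv 1 "R" (by simp)),
      pvFilter_key pieces 2 "B" (hv 2 "B" (by simp)), pvFilter_key pieces 3 "N" (hv 3 "N" (by simp)),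
      pvFilter_key pieces 4 "P" (hv 4 "P" (by simp)), pvFilter_unknown pieces]
  simp [List.append_assoc]

-- ===== VERDICT (by name: the statement is the Claim_ definition above) =====
theorem render_captured_spec : Claim_equal_render_captured := by
  intro captured_white captured_black _
  simp only [Spec_render_captured, render_captured, render_captured_alt, pvRow,
    pvSort_eq_arrange, List.nil_append, List.singleton_append, pvJoin2]
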